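-- pv_equiv track=rewrite | github.com/mustafaaminsyed/uae-reg-lib-rag- | src/ask.py | normalize_notes
-- ===== SOURCE A (Python) =====
-- def normalize_notes(notes: list[str]) -> list[str]:
--     seen: set[str] = set()
--     normalized: list[str] = []
--     for note in notes:
--         compact = " ".join(str(note).split()).strip()
--         if not compact or compact in seen:
--             continue
--         seen.add(compact)
--         normalized.append(compact)
--     return normalized
-- ===== SOURCE B (Python) =====
-- def normalize_notes(notes: list[str]) -> list[str]:
--     cleaned = [" ".join(str(n).split()).strip() for n in notes]
--     out: list[str] = []
--     xs = [c for c in cleaned if c]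
--     while xs:
--         head = xs[0]
--         out.append(head)
--         xs = [x for x in xs[1:] if x != head]
--     return out
-- ===== Notes on version B (the rewrite author's own statement) =====
-- stated objective: alternative
-- what changed: Replaces A's single interleaved loop with a seen-set and membership branch by staged passes (normalize, filter empties) followed by a worklist dedup loop that appends the current head and rebuilds the worklist with all of its duplicates filtered out, maintaining no auxiliary set; this trades A's linear-time set lookups for repeated filtering (quadratic in the number of distinct notes).
import Mathlib
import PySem

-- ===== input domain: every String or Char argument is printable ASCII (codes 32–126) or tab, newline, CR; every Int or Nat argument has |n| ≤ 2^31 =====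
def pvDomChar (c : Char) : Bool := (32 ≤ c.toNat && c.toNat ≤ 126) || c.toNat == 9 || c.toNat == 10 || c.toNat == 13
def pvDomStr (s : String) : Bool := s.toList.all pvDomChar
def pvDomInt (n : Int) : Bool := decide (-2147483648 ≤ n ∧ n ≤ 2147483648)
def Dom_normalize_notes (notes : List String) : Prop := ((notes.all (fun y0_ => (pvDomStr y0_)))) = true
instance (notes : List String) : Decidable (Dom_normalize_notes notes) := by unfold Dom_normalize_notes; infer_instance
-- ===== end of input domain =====

-- B replaces A's interleaved seen-set loop by staged passes (normalize, drop empties) and a recursive head-and-filter deduplication that keeps no auxiliary set.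


-- shared normalization expression ' " ".join(str(note).split()).strip() ' used verbatim by both Pythons
def pvNorm (s : String) : String := PySem.Str.strip (PySem.Str.join " " (PySem.Str.split₀ s))

-- ===== PORT A =====
def normalize_notes (notes : List String) : List String :=
  (notes.foldl
    (fun (st : PySem.Set String × List String) note =>
      let compact := pvNorm note
      if compact == "" || PySem.Set.contains st.1 compact then st
      else (PySem.Set.add st.1 compact, st.2 ++ [compact]))
    (PySem.Set.empty, [])).2

-- ===== PORT B =====
-- worklist dedup loop: append the head to out, filter all its duplicates out of the worklist, repeat
def pvDedupLoop : List String → List String → List String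
  | out, [] => out
  | out, h :: t => pvDedupLoop (out ++ [h]) (t.filter (fun x => !(x == h)))
termination_by _ xs => xs.length
decreasing_by simpa [Nat.lt_succ_iff] using le_trans (List.length_filter_le _ t.attach) (by simp)

def normalize_notes_alt (notes : List String) : List String :=
  let cleaned := notes.map pvNorm
  pvDedupLoop [] (cleaned.filter (fun c => !(c == "")))

-- ===== PRECONDITION & SPEC =====
def Spec_normalize_notes (notes : List String) (out : List String) : Prop := out = normalize_notes_alt notes
instance (notes : List String) (out : List String) : Decidable (Spec_normalize_notes notes out) := by unfold Spec_normalize_notes; infer_instance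

-- ===== CLAIM =====
def Claim_equal_normalize_notes : Prop := ∀ (notes : List String), Dom_normalize_notes notes → Spec_normalize_notes notes (normalize_notes notes)

-- ===== LEMMAS AND PROOFS =====

-- A's loop from a state whose seen-set IS its output list equals a Set.add fold over the filtered, normalized notes.
theorem pv_loop_eq (notes : List String) (s : PySem.Set String) :
    (notes.foldl
      (fun (st : PySem.Set String × List String) note =>
        let compact := pvNorm note
        if compact == "" || PySem.Set.contains st.1 compact then st
        else (PySem.Set.add st.1 compact, st.2 ++ [compact]))
      (s, (s : List String))).2
    = ((notes.map pvNorm).filter (fun c => !(c == ""))).foldl PySem.Set.add s := by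
  induction notes generalizing s with
  | nil => rfl
  | cons n t ih =>
    rw [List.foldl_cons, List.map_cons, List.filter_cons]
    by_cases he : (pvNorm n == "") = true
    · rw [if_pos (by simp [he]), show (!(pvNorm n == "")) = false by simp [he]]
      exact ih s
    · rw [show (!(pvNorm n == "")) = true by simp [he], if_pos rfl]
      by_cases hm : pvNorm n ∈ s
      · rw [if_pos (by simp [hm]), List.foldl_cons,
          show PySem.Set.add s (pvNorm n) = s by simp [PySem.Set.add, hm]]
        exact ih s
      · rw [if_neg (by simp [he, hm]),
          show ((s, s).1.add (pvNorm n), (s, s).2 ++ [pvNorm n])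
              = (s ++ [pvNorm n], s ++ [pvNorm n]) by simp [PySem.Set.add, hm],
          List.foldl_cons,
          show PySem.Set.add s (pvNorm n) = s ++ [pvNorm n] by simp [PySem.Set.add, hm]]
        exact ih (s ++ [pvNorm n])

-- ofList commutes with filter
theorem pv_ofList_filter (l : List String) (p : String → Bool) :
    PySem.Set.ofList (l.filter p) = (PySem.Set.ofList l).filter p := by
  induction l with
  | nil => rfl
  | cons x xs ih =>
    rw [List.filter_cons, PySem.Set.ofList_cons]
    by_cases hp : p x = true
    · rw [if_pos hp, PySem.Set.ofList_cons, ih, List.filter_cons, if_pos hp]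
      simp [PySem.Set.discard, List.filter_filter, Bool.and_comm]
    · rw [if_neg hp, ih, List.filter_cons, if_neg hp]
      simp only [PySem.Set.discard, List.filter_filter]
      apply List.filter_congr
      intro a _
      by_cases hax : a = x
      · subst hax; simp [hp]
      · simp [hax]

-- B's head-and-filter worklist loop computes out ++ set(xs) in first-occurrence order.
theorem pv_dedupLoop_eq_ofList (out l : List String) :
    pvDedupLoop out l = out ++ PySem.Set.ofList l := by
  induction hn : l.length using Nat.strong_induction_on generalizing out l with
  | _ n ih =>
    cases l with
    | nil => simp [pvDedupLoop, PySem.Set.ofList_nil]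
    | cons h t =>
      rw [show pvDedupLoop out (h :: t)
            = pvDedupLoop (out ++ [h]) (t.filter (fun x => !(x == h))) from by
            simp [pvDedupLoop],
          ih (t.filter (fun x => !(x == h))).length
            (by simpa [← hn] using Nat.lt_succ_of_le (List.length_filter_le _ t)) _ _ rfl,
          PySem.Set.ofList_cons, pv_ofList_filter]
      simp [PySem.Set.discard]

-- ===== VERDICT =====
theorem normalize_notes_spec : Claim_equal_normalize_notes := by
  intro notes _
  show normalize_notes notes = normalize_notes_alt notes
  have h := pv_loop_eq notes PySem.Set.empty
  simp only [normalize_notes_alt, pv_dedupLoop_eq_ofList, List.nil_append]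
  simpa [normalize_notes, PySem.Set.empty, PySem.Set.ofList_eq_foldl] using h
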